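-- pv_equiv track=rewrite | github.com/Qais9alnoS/Dasystem2 | DAS Backend/backend/app/services/schedule_optimizer.py | _find_underloaded_teachers
-- ===== SOURCE A (Python) =====
-- from typing import List, Dict, Tuple, Set, Optional, Any, cast
--
-- def _find_underloaded_teachers(teacher_assignments: Dict[int, List[int]]) -> List[Tuple[int, int]]:
--     """Find teachers with light workloads"""
--     underloaded_teachers = []
--     min_periods = 10  # Minimum recommended periods
--
--     for teacher_id, assignments in teacher_assignments.items():
--         if len(assignments) < min_periods:
--             underloaded_teachers.append((teacher_id, len(assignments)))
--
--     # Sort by workload (ascending)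
--     underloaded_teachers.sort(key=lambda x: x[1])
--
--     return underloaded_teachers
-- ===== SOURCE B (Python) =====
-- def _find_underloaded_teachers(teacher_assignments):
--     """Find teachers with light workloads"""
--     # Staged passes: for each possible light workload c (0..9), emit the teachers
--     # having exactly c assignments, in dict order. Concatenating the stages yields
--     # the result sorted ascending by workload with ties in dict order.
--     items = list(teacher_assignments.items())
--     return [(teacher_id, c)
--             for c in range(10)
--             for teacher_id, assignments in items
--             if len(assignments) == c]
-- ===== Notes on version B (the rewrite author's own statement) =====
-- stated objective: alternative
-- what changed: Replaces filter-then-comparison-sort with 10 staged passes (a comprehension over counts 0..9) that emit, per count, the teachers with exactly that workload; concatenation of the stages is the sorted result.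
import Mathlib
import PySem

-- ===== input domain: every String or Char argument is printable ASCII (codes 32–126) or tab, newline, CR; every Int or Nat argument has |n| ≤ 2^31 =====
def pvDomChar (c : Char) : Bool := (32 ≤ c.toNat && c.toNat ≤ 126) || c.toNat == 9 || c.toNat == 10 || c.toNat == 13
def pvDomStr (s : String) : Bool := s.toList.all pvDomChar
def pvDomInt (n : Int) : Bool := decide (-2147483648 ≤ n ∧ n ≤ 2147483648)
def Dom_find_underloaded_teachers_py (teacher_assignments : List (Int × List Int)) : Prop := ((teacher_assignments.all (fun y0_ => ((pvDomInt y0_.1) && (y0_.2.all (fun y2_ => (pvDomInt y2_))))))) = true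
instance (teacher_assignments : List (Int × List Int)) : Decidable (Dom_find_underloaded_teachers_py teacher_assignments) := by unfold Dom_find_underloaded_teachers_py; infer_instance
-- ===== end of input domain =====

-- B replaces A's filter-then-sort with 10 staged passes, one per possible light
-- workload count 0..9, concatenated in order (an alternative algorithm; equal output proved below).


-- ===== PORT A =====
-- the dict parameter is the association list read as a Python dict (duplicate keys overwrite in place)
def find_underloaded_teachers_py (teacher_assignments : List (Int × List Int)) : List (Int × Int) :=
  let d := PySem.Dict.ofList teacher_assignments
  let underloaded_teachers := d.items.foldl
    (fun acc p =>
      if ((p.2.length : Int) < 10) then acc ++ [(p.1, (p.2.length : Int))] else acc) []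
  PySem.List.sorted underloaded_teachers (fun x => x.2)

-- ===== PORT B =====
-- the comprehension: for c in range(10), for (teacher_id, assignments) in items, if len == c
def find_underloaded_teachers_py_alt (teacher_assignments : List (Int × List Int)) : List (Int × Int) :=
  let items := (PySem.Dict.ofList teacher_assignments).items
  (PySem.List.pyRange 0 10 1).flatMap (fun c =>
    (items.filter (fun p => (p.2.length : Int) == c)).map (fun p => (p.1, c)))

-- ===== PRECONDITION & SPEC =====
def Spec_find_underloaded_teachers_py (teacher_assignments : List (Int × List Int)) (out : List (Int × Int)) : Prop := out = find_underloaded_teachers_py_alt teacher_assignments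
instance (teacher_assignments : List (Int × List Int)) (out : List (Int × Int)) : Decidable (Spec_find_underloaded_teachers_py teacher_assignments out) := by unfold Spec_find_underloaded_teachers_py; infer_instance

-- ===== CLAIM (what is proved, stated in full; the proofs are below) =====
def Claim_equal_find_underloaded_teachers_py : Prop := ∀ (teacher_assignments : List (Int × List Int)), Dom_find_underloaded_teachers_py teacher_assignments → Spec_find_underloaded_teachers_py teacher_assignments (find_underloaded_teachers_py teacher_assignments)

-- ===== LEMMAS AND PROOFS =====

-- the retained pairs, in dict order: A sorts them, B produces them stage by stage
def pvU (l : List (Int × List Int)) : List (Int × Int) :=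
  (l.filter (fun p => decide ((p.2.length : Int) < 10))).map (fun p => (p.1, (p.2.length : Int)))

-- concatenation of the per-count stages over the retained pairs
def pvBC (u : List (Int × Int)) : List (Int × Int) :=
  (List.range 10).flatMap (fun (j : Nat) => u.filter (fun q => q.2 == (j : Int)))

lemma pv_insertBy_append_not_before {α : Type} (before : α → α → Bool) (x : α)
    (A B : List α) (h : ∀ a ∈ A, before x a = false) :
    PySem.List.insertBy before x (A ++ B) = A ++ PySem.List.insertBy before x B := by
  induction A with
  | nil => rfl
  | cons a A ih =>
    simp only [List.cons_append, PySem.List.insertBy, h a (by simp), Bool.false_eq_true,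
      if_false, ih (fun a ha => h a (by simp [ha]))]

lemma pv_insertBy_all_before {α : Type} (before : α → α → Bool) (x : α)
    (B : List α) (h : ∀ b ∈ B, before x b = true) :
    PySem.List.insertBy before x B = x :: B := by
  cases B with
  | nil => rfl
  | cons b B => simp [PySem.List.insertBy, h b (by simp)]

lemma pv_insertBy_pvBC (u : List (Int × Int)) (x : Int × Int) (k : Nat) (hk : k < 10)
    (hx : x.2 = (k : Int)) :
    PySem.List.insertBy (fun a b => decide (a.2 < b.2)) x (pvBC u) = pvBC (u ++ [x]) := by
  have h10 : (10 : Nat) = (k + 1) + (9 - k) := by omega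
  have hsplit : List.range 10 = List.range (k + 1) ++ (List.range (9 - k)).map (fun t => (k + 1) + t) := by
    rw [h10, List.range_add]
  unfold pvBC
  rw [hsplit]
  simp only [List.flatMap_append, List.flatMap_map]
  have hA : ∀ a ∈ (List.range (k + 1)).flatMap (fun (j : Nat) => u.filter (fun q => q.2 == (j : Int))),
      (decide (x.2 < a.2)) = false := by
    intro a ha
    simp only [List.mem_flatMap, List.mem_range, List.mem_filter, beq_iff_eq] at ha
    obtain ⟨j, hj, _, haj⟩ := ha
    simp only [decide_eq_false_iff_not, not_lt, hx, haj]
    exact_mod_cast Nat.le_of_lt_succ hj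
  have hB : ∀ b ∈ (List.range (9 - k)).flatMap
      (fun (t : Nat) => u.filter (fun q => q.2 == ((k + 1 + t : Nat) : Int))),
      (decide (x.2 < b.2)) = true := by
    intro b hb
    simp only [List.mem_flatMap, List.mem_range, List.mem_filter, beq_iff_eq] at hb
    obtain ⟨t, ht, _, hbt⟩ := hb
    simp only [decide_eq_true_eq, hx, hbt]
    push_cast
    omega
  rw [pv_insertBy_append_not_before _ _ _ _ hA, pv_insertBy_all_before _ _ _ hB]
  have hfar : ∀ t ∈ List.range (9 - k),
      (u ++ [x]).filter (fun q => q.2 == ((k + 1 + t : Nat) : Int))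
        = u.filter (fun q => q.2 == ((k + 1 + t : Nat) : Int)) := by
    intro t _
    rw [List.filter_append]
    have : (x.2 == ((k + 1 + t : Nat) : Int)) = false := by
      simp only [hx, beq_eq_false_iff_ne, ne_eq]
      intro hco
      have : k = k + 1 + t := by exact_mod_cast hco
      omega
    simp only [List.filter_cons, List.filter_nil, this, Bool.false_eq_true, if_false,
      List.append_nil]
  have hnear : ∀ j ∈ List.range k,
      (u ++ [x]).filter (fun q => q.2 == (j : Int))
        = u.filter (fun q => q.2 == (j : Int)) := by
    intro j hj
    rw [List.filter_append]
    have : (x.2 == ((j : Nat) : Int)) = false := by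
      simp only [hx, beq_eq_false_iff_ne, ne_eq]
      intro hco
      have : k = j := by exact_mod_cast hco
      simp only [List.mem_range] at hj; omega
    simp only [List.filter_cons, List.filter_nil, this, Bool.false_eq_true, if_false,
      List.append_nil]
  have hat : (u ++ [x]).filter (fun q => q.2 == ((k : Nat) : Int))
      = u.filter (fun q => q.2 == ((k : Nat) : Int)) ++ [x] := by
    rw [List.filter_append]
    have : (x.2 == ((k : Nat) : Int)) = true := by simp [hx]
    simp only [List.filter_cons, List.filter_nil, this, if_true]
  rw [List.flatMap_congr hfar]
  conv_lhs => rw [List.range_succ, List.flatMap_append, List.flatMap_singleton]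
  conv_rhs => rw [List.range_succ, List.flatMap_append, List.flatMap_singleton,
    List.flatMap_congr hnear, hat]
  simp [List.append_assoc]

lemma pv_sorted_eq_pvBC (u : List (Int × Int)) (h : ∀ q ∈ u, 0 ≤ q.2 ∧ q.2 < 10) :
    PySem.List.sorted u (fun x => x.2) = pvBC u := by
  induction u using List.reverseRecOn with
  | nil => rfl
  | append_singleton u x ih =>
    have hx0 : 0 ≤ x.2 ∧ x.2 < 10 := h x (by simp)
    have hx : x.2 = (x.2.toNat : Int) := by omega
    have hk : x.2.toNat < 10 := by omega
    rw [PySem.List.sorted_eq_foldl_insertBy, List.foldl_append, List.foldl_cons, List.foldl_nil,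
      ← PySem.List.sorted_eq_foldl_insertBy,
      ih (fun q hq => h q (by simp [hq]))]
    exact pv_insertBy_pvBC u x x.2.toNat hk hx

-- B's stage for count j equals the j-filter of the retained list pvU
lemma pv_stage_eq (l : List (Int × List Int)) (j : Nat) (hj : j < 10) :
    (l.filter (fun p => (p.2.length : Int) == (j : Int))).map (fun p => (p.1, ((j : Nat) : Int)))
      = (pvU l).filter (fun q => q.2 == (j : Int)) := by
  unfold pvU
  rw [List.filter_map]
  have hpred : ∀ p : Int × List Int,
      ((fun q : Int × Int => q.2 == (j : Int)) ∘ (fun p => (p.1, (p.2.length : Int)))) p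
        = ((p.2.length : Int) == (j : Int)) := fun p => rfl
  rw [List.filter_congr (fun p _ => hpred p)]
  have hff : (l.filter (fun p => decide ((p.2.length : Int) < 10))).filter
        (fun p => (p.2.length : Int) == (j : Int))
      = l.filter (fun p => (p.2.length : Int) == (j : Int)) := by
    rw [List.filter_filter]
    apply List.filter_congr
    intro p _
    by_cases hpj : (p.2.length : Int) = (j : Int)
    · simp [hpj, hj]
    · simp [hpj]
  rw [hff]
  apply List.map_congr_left
  intro p hp
  simp only [List.mem_filter, beq_iff_eq] at hp
  simp [hp.2]

-- pyRange(10) enumerates the Int images of range 10 (both sides are closed lists)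
lemma pv_pyRange_ten_flatMap (F : Int → List (Int × Int)) :
    (PySem.List.pyRange 0 10 1).flatMap F = (List.range 10).flatMap (fun j => F ((j : Nat) : Int)) := by
  simp [PySem.List.pyRange, List.range_succ]

-- ===== VERDICT (by name: the statement is the Claim_ definition above) =====
theorem find_underloaded_teachers_py_spec : Claim_equal_find_underloaded_teachers_py := by
  intro ta _
  unfold Spec_find_underloaded_teachers_py
  unfold find_underloaded_teachers_py find_underloaded_teachers_py_alt
  set l := (PySem.Dict.ofList ta).items with hl
  simp only []
  rw [PySem.List.foldl_append_ite (fun p => ((p.2.length : Int) < 10))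
      (fun p => (p.1, (p.2.length : Int))) l []]
  have hbound : ∀ q ∈ pvU l, 0 ≤ q.2 ∧ q.2 < 10 := by
    intro q hq
    simp only [pvU, List.mem_map, List.mem_filter, decide_eq_true_eq] at hq
    obtain ⟨p, ⟨_, hp⟩, rfl⟩ := hq
    exact ⟨by positivity, hp⟩
  rw [List.nil_append,
    show ((l.filter (fun p => decide ((p.2.length : Int) < 10))).map (fun p => (p.1, (p.2.length : Int)))) = pvU l from rfl,
    pv_sorted_eq_pvBC (pvU l) hbound, pvBC, pv_pyRange_ten_flatMap]
  apply List.flatMap_congr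
  intro j hj
  exact (pv_stage_eq l j (by simpa using hj)).symm
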